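-- pv_equiv track=rewrite | github.com/user432/gamma | habitat-lab/habitat/tasks/rearrange/multi_task/rearrange_pddl.py | parse_func
-- ===== SOURCE A (Python) =====
-- from typing import Any, Dict, List, Optional, Tuple, Union
--
-- def parse_func(x: str) -> Tuple[str, List[str]]:
--     """
--     Parses out the components of a function string.
--     :returns: First element is the name of the function, second argument are the function arguments.
--     """
--     try:
--         name = x.split("(")[0]
--         args = x.split("(")[1].split(")")[0]
--         args_list = args.split(",")
--         args_list = [x.strip() for x in args_list]
--     except IndexError as e:
--         raise ValueError(f"Cannot parse '{x}'") from e
--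
--     if len(args_list) == 1 and args_list[0] == "":
--         args_list = []
--
--     return name, args_list
-- ===== SOURCE B (Python) =====
-- import re
--
-- def parse_func(x: str):
--     """
--     Parses out the components of a function string with one regex: the name is
--     everything before the opening parenthesis, the arguments are the
--     parenthesis-free text that follows it.
--     """
--     m = re.match(r"([^(]*)\(([^()]*)", x)
--     if m is None:
--         raise ValueError(f"Cannot parse '{x}'")
--     name, args = m.group(1), m.group(2)
--     args_list = [a.strip() for a in args.split(",")]
--     if len(args_list) == 1 and args_list[0] == "":
--         args_list = []
--     return name, args_list
-- ===== Notes on version B (the rewrite author's own statement) =====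
-- stated objective: idiomatic
-- what changed: Replaces A's three chained str.split calls and try/except with a single anchored regular expression that captures the function name and the parenthesis-free argument text in one match, followed by the same comma split; Pre_ excludes only the inputs with no opening parenthesis, where A (and B) raise ValueError.
import Mathlib
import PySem

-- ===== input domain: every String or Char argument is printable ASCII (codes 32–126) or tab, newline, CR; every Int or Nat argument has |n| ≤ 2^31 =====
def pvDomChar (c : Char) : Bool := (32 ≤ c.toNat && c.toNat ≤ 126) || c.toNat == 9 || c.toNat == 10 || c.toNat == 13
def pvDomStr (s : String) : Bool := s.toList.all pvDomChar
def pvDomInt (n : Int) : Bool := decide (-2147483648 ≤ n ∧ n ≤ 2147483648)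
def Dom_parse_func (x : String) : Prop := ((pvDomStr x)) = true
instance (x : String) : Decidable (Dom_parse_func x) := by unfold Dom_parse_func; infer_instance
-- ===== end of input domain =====

-- B replaces A's three chained str.split calls with one anchored regex that captures the
-- name and the argument text in a single match (idiomatic rewrite, same return value).

-- ===== PORT A =====
-- Port of A: name = x.split("(")[0]; args = x.split("(")[1].split(")")[0];
-- args_list = [a.strip() for a in args.split(",")]; the [1] IndexError (no opening
-- parenthesis in x; Python raises ValueError) is the `none` branch, excluded by Pre_.
def parse_func (x : String) : String × List String :=
  let ps := PySem.Chars.splitOn x.toList "(".toList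
  match PySem.List.pyGet? ps 1 with
  | none => ("", [])  -- Python: raise ValueError (outside Pre_)
  | some second =>
    let name := (PySem.List.pyGet? ps 0).getD []
    let args := (PySem.List.pyGet? (PySem.Chars.splitOn second ")".toList) 0).getD []
    let argsList := (PySem.Chars.splitOn args ",".toList).map PySem.Chars.strip
    -- if len(args_list) == 1 and args_list[0] == "": args_list = []
    let argsList := if argsList = [[]] then [] else argsList
    (String.ofList name, argsList.map String.ofList)

-- ===== PORT B =====
-- Hand-port of re.match(r"([^(]*)\(([^()]*)", x) (PySem has no regex primitive): this
-- anchored pattern matches deterministically — group 1 is the maximal '('-free prefix,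
-- then a literal '(' (no '(' left means no match → none), then group 2 is the maximal
-- run of characters that are neither '(' nor ')'. Exact for this pattern.
def pbMatch? (cs : List Char) : Option (List Char × List Char) :=
  let g1 := cs.takeWhile (· ≠ '(')
  match cs.drop g1.length with
  | [] => none
  | _ :: rest => some (g1, rest.takeWhile (fun c => decide (c ≠ '(' ∧ c ≠ ')')))

def parse_func_alt (x : String) : String × List String :=
  match pbMatch? x.toList with
  | none => ("", [])  -- Python: raise ValueError (outside Pre_)
  | some (name, args) =>
    -- args_list = [a.strip() for a in args.split(",")]
    let argsList := (PySem.Chars.splitOn args ",".toList).map PySem.Chars.strip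
    let argsList := if argsList = [[]] then [] else argsList
    (String.ofList name, argsList.map String.ofList)

-- ===== PRECONDITION & SPEC =====
-- Pre_ excludes exactly the inputs containing no opening parenthesis: Python A raises ValueError there (and so does B).
def Pre_parse_func (x : String) : Prop := '(' ∈ x.toList
instance (x : String) : Decidable (Pre_parse_func x) := by unfold Pre_parse_func; infer_instance
def pvWitness_parse_func : String := "move(obj1, target)"

def Spec_parse_func (x : String) (out : String × List String) : Prop := out = parse_func_alt x
instance (x : String) (out : String × List String) : Decidable (Spec_parse_func x out) := by
  unfold Spec_parse_func; infer_instance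

-- ===== CLAIM (what is proved, stated in full; the proofs are below) =====
def Claim_equal_parse_func : Prop :=
  ∀ (x : String), Dom_parse_func x → Pre_parse_func x → Spec_parse_func x (parse_func x)

-- ===== LEMMAS AND PROOFS =====

-- `pvMapHead f l` applies f to the head of l only.
def pvMapHead (f : List Char → List Char) : List (List Char) → List (List Char)
  | [] => []
  | h :: t => f h :: t

-- Specification-side reference version of str.split(sep) for a single-character sep.
def pvSplitC (c : Char) : List Char → List (List Char)
  | [] => [[]]
  | a :: t => if a = c then [] :: pvSplitC c t else pvMapHead (a :: ·) (pvSplitC c t)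

theorem pvMapHead_pvMapHead (f g : List Char → List Char) (l : List (List Char)) :
    pvMapHead f (pvMapHead g l) = pvMapHead (fun s => f (g s)) l := by
  cases l <;> simp [pvMapHead]

theorem pvMapHead_congr (f g : List Char → List Char) (l : List (List Char))
    (h : ∀ s, f s = g s) : pvMapHead f l = pvMapHead g l := by
  cases l <;> simp [pvMapHead, h]

theorem pvMapHead_id (l : List (List Char)) :
    pvMapHead (fun s => s) l = l := by
  cases l <;> simp [pvMapHead]

theorem splitOn_go_eq (c : Char) :
    ∀ (fuel : Nat) (l cur : List Char) (acc : List (List Char)), l.length < fuel →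
      PySem.Chars.splitOn.go [c] fuel l cur acc
        = acc.reverse ++ pvMapHead (fun s => cur.reverse ++ s) (pvSplitC c l) := by
  intro fuel
  induction fuel with
  | zero => intro l cur acc h; omega
  | succ f ih =>
    intro l cur acc h
    cases l with
    | nil => simp [PySem.Chars.splitOn.go, pvSplitC, pvMapHead]
    | cons a rest =>
      rw [PySem.Chars.splitOn.go]
      by_cases hac : a = c
      · have hpre : List.isPrefixOf [c] (a :: rest) = true := by
          simp [List.isPrefixOf, hac]
        rw [if_pos hpre]
        simp only [List.length_cons] at h
        rw [ih _ _ _ (by simpa using Nat.lt_of_succ_lt_succ h),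
          show List.drop [c].length (a :: rest) = rest from rfl,
          pvMapHead_congr (fun s => [].reverse ++ s) (fun s => s) (pvSplitC c rest) (by simp),
          pvMapHead_id]
        simp [pvSplitC, hac, pvMapHead]
      · have hpre : List.isPrefixOf [c] (a :: rest) = false := by
          simp [List.isPrefixOf]
          exact fun hh => absurd hh.symm hac
        rw [if_neg (by simp [hpre])]
        simp only [List.length_cons] at h
        rw [ih _ _ _ (by omega)]
        simp only [pvSplitC, if_neg hac, pvMapHead_pvMapHead]
        congr 1
        apply pvMapHead_congr
        intro s
        simp

theorem splitOn_eq_pvSplitC (c : Char) (s : List Char) :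
    PySem.Chars.splitOn s [c] = pvSplitC c s := by
  unfold PySem.Chars.splitOn
  rw [splitOn_go_eq c (s.length + 1) s [] [] (by omega)]
  simp [pvMapHead_id]

theorem pvSplitC_head (c : Char) (l : List Char) :
    pvSplitC c l = l.takeWhile (· ≠ c) :: (pvSplitC c l).tail := by
  induction l with
  | nil => simp [pvSplitC]
  | cons a t ih =>
    by_cases hac : a = c
    · simp [pvSplitC, hac, List.takeWhile]
    · rw [pvSplitC, if_neg hac, ih]
      simp [pvMapHead, List.takeWhile, hac]

theorem pvSplitC_append (c : Char) (pre l : List Char) (h : c ∉ pre) :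
    pvSplitC c (pre ++ l) = pvMapHead (fun s => pre ++ s) (pvSplitC c l) := by
  induction pre with
  | nil => simp [pvMapHead_id]
  | cons p pr ih =>
    have hp : p ≠ c := fun hh => h (hh ▸ List.mem_cons_self)
    have hpr : c ∉ pr := fun hh => h (List.mem_cons_of_mem _ hh)
    simp only [List.cons_append, pvSplitC, if_neg hp, ih hpr, pvMapHead_pvMapHead]

-- Decompose a list at its first '('.
theorem exists_paren_split (l : List Char) (h : '(' ∈ l) :
    ∃ pre rest, l = pre ++ '(' :: rest ∧ '(' ∉ pre := by
  induction l with
  | nil => simp at h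
  | cons a t ih =>
    by_cases ha : a = '('
    · exact ⟨[], t, by simp [ha], by simp⟩
    · obtain ⟨pre, rest, hx, hnp⟩ := ih (by
        rcases List.mem_cons.1 h with h1 | h1
        · exact absurd h1.symm ha
        · exact h1)
      exact ⟨a :: pre, rest, by simp [hx], by
        simp [hnp]; exact fun hh => ha hh.symm⟩

-- takeWhile past a '('-free prefix.
theorem takeWhile_paren (pre rest : List Char) (h : '(' ∉ pre) :
    (pre ++ '(' :: rest).takeWhile (· ≠ '(') = pre := by
  induction pre with
  | nil => simp
  | cons p pr ih =>
    have hp : p ≠ '(' := fun hh => h (hh ▸ List.mem_cons_self)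
    simp only [List.cons_append, List.takeWhile_cons]
    rw [if_pos (by simpa using hp), ih (fun hh => h (List.mem_cons_of_mem _ hh))]

-- A's nested takeWhile (first stop at '(', then at ')') is B's single parenthesis-free run.
theorem takeWhile_parens (l : List Char) :
    (l.takeWhile (· ≠ '(')).takeWhile (· ≠ ')')
      = l.takeWhile (fun c => decide (c ≠ '(' ∧ c ≠ ')')) := by
  induction l with
  | nil => simp
  | cons a t ih =>
    by_cases h1 : a = '('
    · simp [h1]
    · by_cases h2 : a = ')'
      · simp [h2]
      · rw [List.takeWhile_cons, if_pos (by simpa using h1), List.takeWhile_cons,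
          if_pos (by simpa using h2), List.takeWhile_cons, if_pos (by simp [h1, h2]), ih]

-- The two ports agree on every input satisfying Pre_.
theorem parse_func_eq_alt (x : String) (hpre : Pre_parse_func x) :
    parse_func x = parse_func_alt x := by
  unfold Pre_parse_func at hpre
  obtain ⟨pre, rest, hx, hnp⟩ := exists_paren_split x.toList hpre
  -- A side: x.split("(") = pre :: split of rest
  have hsplit : pvSplitC '(' x.toList = pre :: pvSplitC '(' rest := by
    rw [hx, pvSplitC_append '(' pre _ hnp,
      show pvSplitC '(' ('(' :: rest) = [] :: pvSplitC '(' rest by rw [pvSplitC]; simp]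
    simp [pvMapHead]
  obtain ⟨t1, ht1⟩ : ∃ t1, pvSplitC '(' rest = rest.takeWhile (· ≠ '(') :: t1 :=
    ⟨_, pvSplitC_head _ _⟩
  obtain ⟨t2, ht2⟩ : ∃ t2, pvSplitC ')' (rest.takeWhile (· ≠ '('))
      = (rest.takeWhile (· ≠ '(')).takeWhile (· ≠ ')') :: t2 :=
    ⟨_, pvSplitC_head _ _⟩
  have g1 : PySem.List.pyGet? (pre :: rest.takeWhile (· ≠ '(') :: t1) (1 : Int)
      = some (rest.takeWhile (· ≠ '(')) := by
    simp [PySem.List.pyGet?, PySem.List.pyIdx?]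
  -- B side: the regex groups
  have htw : x.toList.takeWhile (· ≠ '(') = pre := by
    rw [hx]; exact takeWhile_paren pre rest hnp
  have hdrop : x.toList.drop pre.length = '(' :: rest := by
    rw [hx]; exact List.drop_left
  unfold parse_func parse_func_alt pbMatch?
  simp only [show "(".toList = ['('] from rfl, show ")".toList = [')'] from rfl,
    splitOn_eq_pvSplitC, hsplit, ht1, ht2, g1, PySem.List.pyGet?_zero_cons, Option.getD_some,
    htw, hdrop, takeWhile_parens]

-- ===== VERDICT (by name: the statement is the Claim_ definition above) =====
theorem parse_func_spec : Claim_equal_parse_func := by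
  intro x _ hpre
  unfold Spec_parse_func
  exact parse_func_eq_alt x hpre
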